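/-
  THE CONTRACTS OF `DGifDecreaseImageCounter`, `DGifSlurp`, `DGifCloseFile` (design/CONTRACTS.md entries 18-20; design/INVARIANTS.md
  §2.1, §7). Vocabulary: Gif/Spec/Common.lean (+ CommonMore.lean §8). Forest-level contracts, as in Gif/Spec/Desc.lean.

  FRAMES (design/FRAMES.gif.txt):
      function                    own                        callees (frame)                                                       frame
      DGifDecreaseImageCounter    2 pushes + sub 8 = 24      openbsd_reallocarray (144), GifFreeMapObject (48), free (24)      24 + 8 + 144 = 176
      DGifSlurp                   6 pushes + sub 104 = 152   DGifGetLine (688), DGifGetImageDesc (496), DGifGetExtension (432), …    152 + 8 + 688 = 848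
      DGifCloseFile               4 pushes + sub 8 = 40      GifFreeSavedImages (112), GifFreeExtensions (80), GifFreeMapObject (48), free (24)   40 + 8 + 112 = 160
-/
import Gif.Spec.CommonMore
import Gif.Spec.Reader
namespace Gif.Spec
open X86 X86.User Asan ProgX.Base ProgX.Base.Spec

/-- **`DGifDecreaseImageCounter(rdi = gif)`** (dgif_lib.c:1156-1179): `ImageCount--`; frees the dropped slot's raster (if any) and
colour map (if any: the slot's pointers DANGLE, the slot is no longer counted); `ImageCount = 0`: frees the array, nulls the
field; otherwise shrinks it (`reallocarray(SavedImages, ImageCount, 56)`: in place, moved, or failed — then the old array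
stays, one slot longer than the count).
Pre: at least one counted image, and THE LAST HAS NO EXTENSION LIST (EX3: the function does not free it; with a list that would be
a leak. True at its five call sites: each follows a successful DGifGetImageDesc of the same record). Post: `F'` differs from `F` in
`saved` only: the last image is gone, the others are the same. -/
def DGifDecreaseImageCounter.spec (H : Heap) (rest : List Obj) (frames : List (Nat × FrameLayout)) (F : Forest) (R : Rd)
    (init : List Img) (g : Img) : Spec where
  pre u :=
    Env H rest frames F R u ∧
    (u.reg .rdi).toNat = F.gif ∧
    F.imgs = init ++ [g] ∧ g.ext = none
  post u v :=
    ∃ H' F', Back2 H rest frames R u v H' F' ∧ F.SameButSaved F' ∧ F'.imgs = init ∧ rem R v.mem = rem R u.mem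
  frame := 176
  writes _ :=
    [⟨0x800000, 0x1000020⟩]

@[vspec] theorem DGifDecreaseImageCounter.spec_frame (H : Heap) (rest : List Obj) (frames : List (Nat × FrameLayout)) (F : Forest)
    (R : Rd) (init : List Img) (g : Img) : (DGifDecreaseImageCounter.spec H rest frames F R init g).frame = 176 := id rfl

@[vspec] theorem DGifDecreaseImageCounter.spec_writes (H : Heap) (rest : List Obj) (frames : List (Nat × FrameLayout)) (F : Forest)
    (R : Rd) (init : List Img) (g : Img) (u : State) :
    (DGifDecreaseImageCounter.spec H rest frames F R init g).writes u =
      [⟨0x800000, 0x1000020⟩] := id rfl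

/-- **`DGifSlurp(rdi = gif)`** (dgif_lib.c:1186-1324; a PROTECTED frame: `RecordType`, `ExtData`, `ExtFunction`): the record loop.
Pre: `Env`, every counted image complete (on the path: none yet). Post, FOR EVERY RETURN VALUE (the driver ignores it): A heap, A
forest with the state invariant and EVERY COUNTED IMAGE COMPLETE — `CloseOK`: what DGifCloseFile and the digest need (design point
RET). Termination: `rem` (a successful DGifGetRecordType consumes a byte). -/
def DGifSlurp.spec (H : Heap) (rest : List Obj) (frames : List (Nat × FrameLayout)) (F : Forest) (R : Rd) : Spec where
  pre u :=
    Env H rest frames F R u ∧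
    (u.reg .rdi).toNat = F.gif ∧
    F.Complete
  post u v :=
    ∃ H' F', Back2 H rest frames R u v H' F' ∧ F'.gif = F.gif ∧ F'.pv = F.pv ∧ F'.Complete
  frame := 848
  writes _ :=
    [⟨0x800000, 0x1000020⟩,
     ⟨R.cur, R.cur + 8⟩]

@[vspec] theorem DGifSlurp.spec_frame (H : Heap) (rest : List Obj) (frames : List (Nat × FrameLayout)) (F : Forest) (R : Rd) :
    (DGifSlurp.spec H rest frames F R).frame = 848 := id rfl

@[vspec] theorem DGifSlurp.spec_writes (H : Heap) (rest : List Obj) (frames : List (Nat × FrameLayout)) (F : Forest) (R : Rd)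
    (u : State) :
    (DGifSlurp.spec H rest frames F R).writes u =
      [⟨0x800000, 0x1000020⟩,
       ⟨R.cur, R.cur + 8⟩] := id rfl

/-- **`DGifCloseFile(rdi = gif, rsi = ErrorCode)`** (dgif_lib.c:683-735): frees the image's local map and the screen's map (each
NULL-tested; each field nulled), the saved images (GifFreeSavedImages, if the array is not NULL; the field nulled), the pending
extension list (GifFreeExtensions, unconditionally: also the empty list), then `free(Private)`, `free(GifFile)` — `gif.Private`
is loaded three times while gif is live; gif is freed LAST — and stores `*ErrorCode`. `Private->File = NULL` (PR2): `fclose` (a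
stub) is never called.
Pre: `Env` (it does not need the images complete: every pointer is NULL-tested). Post: A heap with its invariant (every object of
the forest is freed: not claimed — leaks are no part of the theorem); the cursor as it was. -/
def DGifCloseFile.spec (H : Heap) (rest : List Obj) (frames : List (Nat × FrameLayout)) (F : Forest) (R : Rd) : Spec where
  pre u :=
    Env H rest frames F R u ∧
    (u.reg .rdi).toNat = F.gif ∧
    ErrPtr H rest frames R (u.reg .rsi).toNat
  post u v :=
    ∃ H', SameRegion H H' ∧
      HeapInv H' rest frames ((u.reg .rsp).toNat + 8) v.mem ∧
      CursorOK R v.mem ∧ rem R v.mem = rem R u.mem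
  frame := 160
  writes u :=
    [⟨0x800000, 0x1000020⟩,
     ⟨(u.reg .rsi).toNat, (u.reg .rsi).toNat + 4⟩]

@[vspec] theorem DGifCloseFile.spec_frame (H : Heap) (rest : List Obj) (frames : List (Nat × FrameLayout)) (F : Forest) (R : Rd) :
    (DGifCloseFile.spec H rest frames F R).frame = 160 := id rfl

@[vspec] theorem DGifCloseFile.spec_writes (H : Heap) (rest : List Obj) (frames : List (Nat × FrameLayout)) (F : Forest) (R : Rd)
    (u : State) :
    (DGifCloseFile.spec H rest frames F R).writes u =
      [⟨0x800000, 0x1000020⟩,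
       ⟨(u.reg .rsi).toNat, (u.reg .rsi).toNat + 4⟩] := id rfl

end Gif.Spec
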